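-- pv_equiv track=rewrite | github.com/Zihang-Xu-2002/Algorithm-Practice | String/Tiktok Number of Substrings Without Vowels.py | numberOfSubstringsWithoutVowels
-- ===== SOURCE A (Python) =====
-- def numberOfSubstringsWithoutVowels(s: str) -> int:
--   voewls = {'a', 'e', 'i', 'o', 'u'}
--   substrings = []
--   # 外层循环用于起点
--   for i in range(len(s)):
--       # 内层循环用于终点
--       for j in range(i + 1, len(s) + 1):
--           substrings.append(s[i:j])
--   subStringToRemove = []
--   for item in substrings:
--       if any(c in voewls for c in item):
--           subStringToRemove.append(item)
--   for item in subStringToRemove: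
--       substrings.remove(item)
--   return len(substrings)
-- ===== SOURCE B (Python) =====
-- def numberOfSubstringsWithoutVowels(s: str) -> int:
--     total = 0
--     run = 0
--     for c in s:
--         if c in 'aeiou':
--             run = 0
--         else:
--             run += 1
--         total += run
--     return total
-- ===== Notes on version B (the rewrite author's own statement) =====
-- stated objective: faster
-- what changed: Replaces materialising all O(n^2) substrings and removing the vowelled ones one by one (O(n^3+) work) with a single left-to-right pass that adds, for each position, the length of the consonant run ending there.
import Mathlib
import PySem

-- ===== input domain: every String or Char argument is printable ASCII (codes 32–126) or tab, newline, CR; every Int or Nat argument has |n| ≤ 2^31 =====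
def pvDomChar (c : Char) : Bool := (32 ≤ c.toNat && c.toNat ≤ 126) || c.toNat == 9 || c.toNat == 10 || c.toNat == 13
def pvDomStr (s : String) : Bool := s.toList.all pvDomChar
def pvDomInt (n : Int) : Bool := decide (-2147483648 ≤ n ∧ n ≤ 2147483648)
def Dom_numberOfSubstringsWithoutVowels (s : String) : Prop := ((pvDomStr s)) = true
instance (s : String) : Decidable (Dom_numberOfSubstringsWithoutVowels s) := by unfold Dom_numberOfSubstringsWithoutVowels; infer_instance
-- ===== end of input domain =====

-- B replaces A's "materialise every substring, then remove the vowelled ones" with a single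
-- pass summing consonant-run lengths; objective: faster (asymptotic, measured by the check).


-- ===== PORT A =====
-- voewls = {'a', 'e', 'i', 'o', 'u'}
def pvVowelsA : PySem.Set Char := PySem.Set.ofList ['a', 'e', 'i', 'o', 'u']

-- Literal transliteration of A over the character list: both index loops, the list of
-- slices, the second pass collecting substrings to remove, and the one-by-one .remove.
-- `substrings.remove(item)` (ValueError when absent — never reached here, since every
-- removed item was collected from `substrings`) is PySem.List.remove? with getD.
def numberOfSubstringsWithoutVowels (s : String) : Int :=
  let l := s.toList
  let n : Int := (l.length : Int)
  let substrings : List (List Char) :=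
    (PySem.List.pyRange 0 n 1).foldl (fun acc i =>
      (PySem.List.pyRange (i + 1) (n + 1) 1).foldl (fun acc2 j =>
        acc2 ++ [PySem.List.slice l (some i) (some j)]) acc) []
  let subStringToRemove : List (List Char) :=
    substrings.foldl (fun acc item =>
      if item.any (fun c => PySem.Set.contains pvVowelsA c) then acc ++ [item] else acc) []
  let final : List (List Char) :=
    subStringToRemove.foldl (fun acc item => (PySem.List.remove? acc item).getD acc) substrings
  (final.length : Int)

-- ===== PORT B =====
-- 'aeiou'
def pvVowelsB : List Char := "aeiou".toList

-- one pass: run = length of the consonant run ending at the current char; total += run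
def numberOfSubstringsWithoutVowels_alt (s : String) : Int :=
  (s.toList.foldl (fun (st : Int × Int) c =>
    let run : Int := if pvVowelsB.contains c then 0 else st.1 + 1
    (run, st.2 + run)) (0, 0)).2

-- ===== PRECONDITION & SPEC =====
def Spec_numberOfSubstringsWithoutVowels (s : String) (out : Int) : Prop := out = numberOfSubstringsWithoutVowels_alt s
instance (s : String) (out : Int) : Decidable (Spec_numberOfSubstringsWithoutVowels s out) := by unfold Spec_numberOfSubstringsWithoutVowels; infer_instance

-- ===== CLAIM (what is proved, stated in full; the proofs are below) =====
def Claim_equal_numberOfSubstringsWithoutVowels : Prop := ∀ (s : String), Dom_numberOfSubstringsWithoutVowels s → Spec_numberOfSubstringsWithoutVowels s (numberOfSubstringsWithoutVowels s)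

-- ===== LEMMAS AND PROOFS =====

-- vowel test used by the proofs (both ports' tests reduce to it)
def pvVw (c : Char) : Bool := (['a', 'e', 'i', 'o', 'u'] : List Char).contains c
-- length of the longest vowel-free prefix
def pvHL (t : List Char) : Nat := (t.takeWhile (fun c => !pvVw c)).length
-- gN l = number of vowel-free substrings of l (indexed by start position)
def pvG : List Char → Nat
  | [] => 0
  | c :: t => pvHL (c :: t) + pvG t

theorem pvVowelsA_contains (c : Char) : PySem.Set.contains pvVowelsA c = pvVw c := by
  rfl

theorem pvHL_cons (c : Char) (t : List Char) :
    pvHL (c :: t) = if pvVw c then 0 else pvHL t + 1 := by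
  simp [pvHL, List.takeWhile]
  cases h : pvVw c <;> simp

-- removing an element ≠ a from a::acc keeps a in front
theorem pv_fold_remove_cons (r : List (List Char)) (a : List Char) :
    ∀ acc : List (List Char), (∀ it ∈ r, it ≠ a) →
      r.foldl (fun acc item => (PySem.List.remove? acc item).getD acc) (a :: acc)
        = a :: r.foldl (fun acc item => (PySem.List.remove? acc item).getD acc) acc := by
  induction r with
  | nil => intro acc _; rfl
  | cons it r' ih =>
      intro acc h
      have hne : a ≠ it := fun he => (h it (by simp)) he.symm
      have hstep : (PySem.List.remove? (a :: acc) it).getD (a :: acc)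
          = a :: (PySem.List.remove? acc it).getD acc := by
        rw [PySem.List.remove?_cons_of_ne _ hne]
        cases PySem.List.remove? acc it <;> rfl
      simp only [List.foldl_cons, hstep]
      exact ih _ (fun x hx => h x (by simp [hx]))

-- A's remove loop: starting from xs and removing xs.filter p one by one leaves
-- exactly the elements not satisfying p (by count)
theorem pv_fold_remove_filter (p : List Char → Bool) :
    ∀ xs : List (List Char),
      ((xs.filter p).foldl (fun acc item => (PySem.List.remove? acc item).getD acc) xs).length
        = (xs.filter (fun x => !p x)).length := by
  intro xs
  induction xs with
  | nil => rfl
  | cons x t ih =>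
      by_cases hp : p x = true
      · simp only [List.filter_cons, hp, if_true, List.foldl_cons, Bool.not_true,
          Bool.false_eq_true, if_false]
        have h1 : (PySem.List.remove? (x :: t) x).getD (x :: t) = t := by simp
        rw [h1]; exact ih
      · have hpx : p x = false := by simpa using hp
        simp only [List.filter_cons, hpx, Bool.false_eq_true, if_false, Bool.not_false, if_true]
        rw [pv_fold_remove_cons _ _ _ (fun it hit => by
          intro he; rw [he] at hit; exact hp (List.of_mem_filter hit))]
        simp [ih]

theorem pvHL_le (t : List Char) : pvHL t ≤ t.length := by
  unfold pvHL
  induction t with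
  | nil => simp
  | cons c t ih =>
      by_cases h : (!pvVw c) = true <;> simp [List.takeWhile, h]
      omega

-- a prefix of length m ≤ |t| is vowel-free iff m ≤ pvHL t
theorem pv_take_any (t : List Char) : ∀ m : Nat, m ≤ t.length →
    (!((t.take m).any pvVw)) = decide (m ≤ pvHL t) := by
  induction t with
  | nil =>
      intro m hm
      have hm0 : m = 0 := Nat.le_zero.mp hm
      subst hm0; simp [pvHL]
  | cons c t ih =>
      intro m hm
      cases m with
      | zero => simp
      | succ m' =>
          cases h : pvVw c
          · simp only [List.take_succ_cons, List.any_cons, h, Bool.false_or,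
              ih m' (by simpa using hm), pvHL_cons]
            simp
          · simp [h, pvHL_cons]

theorem pv_countP_range (N H : Nat) :
    (List.range N).countP (fun m => decide (m + 1 ≤ H)) = min H N := by
  induction N with
  | zero => simp
  | succ N' ih =>
      rw [List.range_succ, List.countP_append, ih]
      have hone : (List.countP (fun m => decide (m + 1 ≤ H)) [N']) = if N' + 1 ≤ H then 1 else 0 := by
        simp [List.countP_cons]
      rw [hone]
      split_ifs with h <;> omega

-- per-start-index count: number of end indices j giving a vowel-free slice
theorem pv_perK (l : List Char) (k : Nat) (hk : k < l.length) :
    ((PySem.List.pyRange ((k : Int) + 1) ((l.length : Int) + 1) 1).map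
        (fun j => PySem.List.slice l (some (k : Int)) (some j))).countP
      (fun x => !(x.any pvVw)) = pvHL (l.drop k) := by
  rw [PySem.List.pyRange_one, List.map_map, List.countP_map]
  have harg : ((l.length : Int) + 1 - ((k : Int) + 1)).toNat = l.length - k := by omega
  rw [harg]
  have hcong : (List.range (l.length - k)).countP
      ((fun x => !(x.any pvVw)) ∘ (fun j => PySem.List.slice l (some (k : Int)) (some j)) ∘
        (fun m : Nat => (k : Int) + 1 + (m : Int)))
      = (List.range (l.length - k)).countP (fun m => decide (m + 1 ≤ pvHL (l.drop k))) := by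
    apply List.countP_congr
    intro m hm
    have hmlt : m < l.length - k := List.mem_range.mp hm
    have hsl : PySem.List.slice l (some (k : Int)) (some ((k : Int) + 1 + (m : Int)))
        = (l.drop k).take (m + 1) := by
      rw [PySem.List.slice_toNat l (by omega) (by omega)]
      congr 1
      omega
    simp only [Function.comp, hsl]
    rw [pv_take_any (l.drop k) (m + 1) (by simp [List.length_drop]; omega)]
  rw [hcong, pv_countP_range]
  have := pvHL_le (l.drop k)
  simp only [List.length_drop] at this
  omega

-- summing the per-start counts over all start positions gives pvG
theorem pv_sum_drop (l : List Char) :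
    ((List.range l.length).map (fun k => pvHL (l.drop k))).sum = pvG l := by
  induction l with
  | nil => simp [pvG]
  | cons c t ih =>
      rw [List.length_cons, List.range_succ_eq_map, List.map_cons, List.map_map, List.sum_cons]
      have : (List.map ((fun k => pvHL ((c :: t).drop k)) ∘ Nat.succ) (List.range t.length)).sum
          = (List.map (fun k => pvHL (t.drop k)) (List.range t.length)).sum := by
        refine congrArg List.sum (List.map_congr_left ?_)
        intro a _
        simp [Function.comp, List.drop_succ_cons]
      rw [this, ih]
      simp [pvG]

-- B's fold with carried run r: total + pvG l + r * (length of l's vowel-free prefix)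
theorem pv_fold_b (l : List Char) : ∀ (r t : Int),
    (l.foldl (fun (st : Int × Int) c =>
        (if pvVw c then 0 else st.1 + 1, st.2 + (if pvVw c then 0 else st.1 + 1))) (r, t)).2
      = t + (pvG l : Int) + r * (pvHL l : Int) := by
  induction l with
  | nil => intro r t; simp [pvG, pvHL]
  | cons c l' ih =>
      intro r t
      simp only [List.foldl_cons]
      cases h : pvVw c
      · simp only [Bool.false_eq_true, if_false]
        rw [ih]
        have h1 : pvG (c :: l') = pvHL l' + 1 + pvG l' := by
          simp [pvG, pvHL_cons, h]
        have h2 : pvHL (c :: l') = pvHL l' + 1 := by simp [pvHL_cons, h]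
        rw [h1, h2]
        push_cast
        ring
      · simp only [if_true]
        rw [ih]
        have h1 : pvG (c :: l') = pvG l' := by simp [pvG, pvHL_cons, h]
        have h2 : pvHL (c :: l') = 0 := by simp [pvHL_cons, h]
        rw [h1, h2]
        push_cast
        ring

-- A computes pvG of the character list
theorem pv_a_eq (s : String) : numberOfSubstringsWithoutVowels s = (pvG s.toList : Int) := by
  unfold numberOfSubstringsWithoutVowels
  simp only [PySem.List.foldl_append_singleton_eq_map, PySem.List.foldl_append_eq_flatMap,
    PySem.List.foldl_append_if_eq_filter, List.nil_append, pvVowelsA_contains]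
  rw [pv_fold_remove_filter]
  rw [← List.countP_eq_length_filter]
  rw [PySem.List.pyRange_zero_nat, List.flatMap_map, List.countP_flatMap]
  have hcong : List.map ((List.countP fun x => !x.any fun c => pvVw c) ∘ fun a : Nat =>
        List.map (fun j => PySem.List.slice s.toList (some (a : Int)) (some j))
          (PySem.List.pyRange ((a : Int) + 1) ((s.toList.length : Int) + 1) 1))
        (List.range s.toList.length)
      = List.map (fun k => pvHL (s.toList.drop k)) (List.range s.toList.length) := by
    apply List.map_congr_left
    intro k hk
    exact pv_perK s.toList k (List.mem_range.mp hk)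
  rw [hcong, pv_sum_drop]

-- ===== VERDICT (by name: the statement is the Claim_ definition above) =====
theorem numberOfSubstringsWithoutVowels_spec : Claim_equal_numberOfSubstringsWithoutVowels := by
  intro s _
  unfold Spec_numberOfSubstringsWithoutVowels
  rw [pv_a_eq]
  have halt : numberOfSubstringsWithoutVowels_alt s
      = (s.toList.foldl (fun (st : Int × Int) c =>
          (if pvVw c then 0 else st.1 + 1, st.2 + (if pvVw c then 0 else st.1 + 1))) (0, 0)).2 := rfl
  rw [halt, pv_fold_b]
  simp
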